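-- pv_equiv track=rewrite | github.com/FabianLinde/BPMN2SWRL | Sheylas_implementation/swrl_exporter.py | _atom_list_xml
-- ===== SOURCE A (Python) =====
-- from typing import Iterable, List, Set, Tuple
--
-- RDF_NIL = "http://www.w3.org/1999/02/22-rdf-syntax-ns#nil"
--
-- def _indent(s: str, n: int) -> str:
--     pad = " " * n
--     return "\n".join(pad + line if line.strip() else line for line in s.splitlines())
--
-- def _atom_list_xml(atoms_xml: List[str], indent: int) -> str:
--     """
--     Build a proper RDF list of SWRL atoms:
--
--       <swrl:AtomList>
--         <rdf:first>ATOM_1</rdf:first>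
--         <rdf:rest>
--           <swrl:AtomList>
--             <rdf:first>ATOM_2</rdf:first>
--             <rdf:rest rdf:resource="...#nil"/>
--           </swrl:AtomList>
--         </rdf:rest>
--       </swrl:AtomList>
--     """
--     pad = " " * indent
--     if not atoms_xml:
--         # Empty list: point directly to rdf:nil (some tools accept this; keeps output valid RDF)
--         return f'{pad}<rdf:Description rdf:about="{RDF_NIL}"/>'
--
--     first = atoms_xml[0]
--     rest = atoms_xml[1:]
--
--     if not rest:
--         return (
--             f"{pad}<swrl:AtomList>\n"
--             f"{pad}  <rdf:first>\n{_indent(first, indent + 4)}\n{pad}  </rdf:first>\n"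
--             f'{pad}  <rdf:rest rdf:resource="{RDF_NIL}"/>\n'
--             f"{pad}</swrl:AtomList>"
--         )
--
--     return (
--         f"{pad}<swrl:AtomList>\n"
--         f"{pad}  <rdf:first>\n{_indent(first, indent + 4)}\n{pad}  </rdf:first>\n"
--         f"{pad}  <rdf:rest>\n{_atom_list_xml(rest, indent + 4)}\n{pad}  </rdf:rest>\n"
--         f"{pad}</swrl:AtomList>"
--     )
-- ===== SOURCE B (Python) =====
-- from typing import List
--
-- RDF_NIL = "http://www.w3.org/1999/02/22-rdf-syntax-ns#nil"
--
-- def _indent(s: str, n: int) -> str: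
--     pad = " " * n
--     return "\n".join(pad + line if line.strip() else line for line in s.splitlines())
--
-- def _atom_list_xml(atoms_xml: List[str], indent: int) -> str:
--     if not atoms_xml:
--         pad = " " * indent
--         return f'{pad}<rdf:Description rdf:about="{RDF_NIL}"/>'
--
--     # Iterative build, last atom first, threading the accumulated "rest" block.
--     out = None
--     for i, atom in reversed(list(enumerate(atoms_xml))):
--         p = " " * (indent + 4 * i)
--         body = _indent(atom, indent + 4 * i + 4)
--         if out is None:
--             rest_block = f'{p}  <rdf:rest rdf:resource="{RDF_NIL}"/>\n'
--         else:
--             rest_block = f"{p}  <rdf:rest>\n{out}\n{p}  </rdf:rest>\n"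
--         out = (
--             f"{p}<swrl:AtomList>\n"
--             f"{p}  <rdf:first>\n{body}\n{p}  </rdf:first>\n"
--             + rest_block
--             + f"{p}</swrl:AtomList>"
--         )
--     return out
-- ===== Notes on version B (the rewrite author's own statement) =====
-- stated objective: alternative
-- what changed: Replaces A's recursion over the atom list with an explicit iterative build that walks the enumerated atoms from last to first, threading the accumulated rest-block string; the empty case is handled up front.
import Mathlib
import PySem

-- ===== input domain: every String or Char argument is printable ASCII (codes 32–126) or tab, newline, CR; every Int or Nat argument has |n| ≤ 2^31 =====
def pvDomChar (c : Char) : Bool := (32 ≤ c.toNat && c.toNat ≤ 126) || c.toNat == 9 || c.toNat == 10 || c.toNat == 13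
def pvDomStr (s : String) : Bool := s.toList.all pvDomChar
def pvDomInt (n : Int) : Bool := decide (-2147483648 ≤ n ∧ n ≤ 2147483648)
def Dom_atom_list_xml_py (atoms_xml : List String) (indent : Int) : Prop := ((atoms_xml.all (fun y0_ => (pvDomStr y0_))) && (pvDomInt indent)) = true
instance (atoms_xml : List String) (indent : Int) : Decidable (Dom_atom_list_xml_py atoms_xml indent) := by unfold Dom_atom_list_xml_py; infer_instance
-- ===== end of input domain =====

-- B replaces A's recursion by an iterative last-to-first loop over the enumerated atoms,
-- threading the accumulated "rest" block (objective: alternative decomposition, same cost).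


-- ===== PORT A =====
def RDF_NIL : String := "http://www.w3.org/1999/02/22-rdf-syntax-ns#nil"

-- " " * n  (Python: empty for n ≤ 0)
def pySpaces (n : Int) : String := String.ofList (PySem.List.pyRepeat [' '] n)

-- port of _indent (shared helper of both Pythons)
def indentHelper (s : String) (n : Int) : String :=
  let pad := pySpaces n
  PySem.Str.join "\n" ((PySem.Str.splitlines s).map
    (fun line => if PySem.Str.strip line ≠ "" then pad ++ line else line))

def atom_list_xml_py : List String → Int → String
  | [], indent => pySpaces indent ++ "<rdf:Description rdf:about=\"" ++ RDF_NIL ++ "\"/>"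
  | first :: rest, indent =>
    let pad := pySpaces indent
    if rest = [] then
      pad ++ "<swrl:AtomList>\n" ++
      pad ++ "  <rdf:first>\n" ++ indentHelper first (indent + 4) ++ "\n" ++ pad ++ "  </rdf:first>\n" ++
      pad ++ "  <rdf:rest rdf:resource=\"" ++ RDF_NIL ++ "\"/>\n" ++
      pad ++ "</swrl:AtomList>"
    else
      pad ++ "<swrl:AtomList>\n" ++
      pad ++ "  <rdf:first>\n" ++ indentHelper first (indent + 4) ++ "\n" ++ pad ++ "  </rdf:first>\n" ++
      pad ++ "  <rdf:rest>\n" ++ atom_list_xml_py rest (indent + 4) ++ "\n" ++ pad ++ "  </rdf:rest>\n" ++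
      pad ++ "</swrl:AtomList>"

-- ===== PORT B =====
-- one loop iteration of Source B (atom i, threading the accumulated rest block)
def altStep (indent : Int) (p : Int × String) (out : Option String) : Option String :=
  let pd := pySpaces (indent + 4 * p.1)
  let body := indentHelper p.2 (indent + 4 * p.1 + 4)
  let restBlock :=
    match out with
    | none => pd ++ "  <rdf:rest rdf:resource=\"" ++ RDF_NIL ++ "\"/>\n"
    | some o => pd ++ "  <rdf:rest>\n" ++ o ++ "\n" ++ pd ++ "  </rdf:rest>\n"
  some (pd ++ "<swrl:AtomList>\n" ++
        pd ++ "  <rdf:first>\n" ++ body ++ "\n" ++ pd ++ "  </rdf:first>\n" ++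
        restBlock ++
        pd ++ "</swrl:AtomList>")

def atom_list_xml_py_alt (atoms_xml : List String) (indent : Int) : String :=
  if atoms_xml = [] then
    pySpaces indent ++ "<rdf:Description rdf:about=\"" ++ RDF_NIL ++ "\"/>"
  else
    (((PySem.List.enumerate atoms_xml 0).reverse.foldl
        (fun out p => altStep indent p out) none).getD "")

-- ===== PRECONDITION & SPEC =====
def Spec_atom_list_xml_py (atoms_xml : List String) (indent : Int) (out : String) : Prop := out = atom_list_xml_py_alt atoms_xml indent
instance (atoms_xml : List String) (indent : Int) (out : String) : Decidable (Spec_atom_list_xml_py atoms_xml indent out) := by unfold Spec_atom_list_xml_py; infer_instance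

-- ===== CLAIM (what is proved, stated in full; the proofs are below) =====
def Claim_equal_atom_list_xml_py : Prop := ∀ (atoms_xml : List String) (indent : Int), Dom_atom_list_xml_py atoms_xml indent → Spec_atom_list_xml_py atoms_xml indent (atom_list_xml_py atoms_xml indent)

-- ===== LEMMAS AND PROOFS =====

-- B's loop over the enumeration starting at s computes A's result at indent + 4*s.
theorem altLoop_eq (atoms : List String) (hne : atoms ≠ []) (indent s : Int) :
    (PySem.List.enumerate atoms s).reverse.foldl (fun out p => altStep indent p out) none
      = some (atom_list_xml_py atoms (indent + 4 * s)) := by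
  induction atoms generalizing s with
  | nil => exact absurd rfl hne
  | cons a as ih =>
    rw [PySem.List.enumerate_cons]
    cases as with
    | nil =>
      simp only [PySem.List.enumerate_nil, List.reverse_cons, List.reverse_nil, List.nil_append,
        List.foldl_cons, List.foldl_nil, atom_list_xml_py, altStep, reduceIte,
        String.append_assoc]
    | cons b t =>
      rw [List.reverse_cons, List.foldl_append, ih (by simp) (s + 1)]
      have h4 : indent + 4 * (s + 1) = indent + 4 * s + 4 := by ring
      rw [h4]
      simp only [List.foldl_cons, List.foldl_nil, atom_list_xml_py, altStep, reduceCtorEq,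
        if_false, String.append_assoc]

-- ===== VERDICT (by name: the statement is the Claim_ definition above) =====
theorem atom_list_xml_py_spec : Claim_equal_atom_list_xml_py := by
  intro atoms indent _
  unfold Spec_atom_list_xml_py atom_list_xml_py_alt
  cases atoms with
  | nil => simp [atom_list_xml_py]
  | cons a as =>
    rw [if_neg (by simp), altLoop_eq (a :: as) (by simp) indent 0]
    norm_num
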